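-- pv_equiv track=rewrite | github.com/ChaplotVishwa/HR-Project | hybrid_ranking_system.py | _score_education
-- ===== SOURCE A (Python) =====
-- from typing import List, Dict, Tuple, Optional
--
-- def _score_education(candidate: Dict, job_desc: Dict) -> float:
--     """Score candidate's education"""
--     score = 50  # Base score
--
--     if 'education' in candidate:
--         edu_text = str(candidate['education']).lower()
--
--         # Degree scoring
--         if 'phd' in edu_text or 'doctorate' in edu_text:
--             score = 100
--         elif 'master' in edu_text or 'msc' in edu_text or 'mba' in edu_text:
--             score = 85
--         elif 'bachelor' in edu_text or 'bsc' in edu_text or 'ba' in edu_text: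
--             score = 70
--
--         # Field relevance
--         relevant_fields = ['computer science', 'software', 'engineering', 'data science', 'mathematics']
--         if any(field in edu_text for field in relevant_fields):
--             score = min(score + 15, 100)
--
--     return score
-- ===== SOURCE B (Python) =====
-- KW_SCORES = {'phd': 100, 'doctorate': 100,
--              'master': 85, 'msc': 85, 'mba': 85,
--              'bachelor': 70, 'bsc': 70, 'ba': 70}
--
-- FIELDS = ('computer science', 'software', 'engineering', 'data science', 'mathematics')
--
-- def _score_education(candidate, job_desc):
--     """Single left-to-right scan of the education text: at each position,
--     take the best degree keyword starting there and set the field bonus."""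
--     if 'education' not in candidate:
--         return 50
--     text = str(candidate['education']).lower()
--     best, bonus = 50, 0
--     for i in range(len(text)):
--         for kw, s in KW_SCORES.items():
--             if text.startswith(kw, i) and best < s:
--                 best = s
--         if bonus == 0 and any(text.startswith(f, i) for f in FIELDS):
--             bonus = 15
--     return min(best + bonus, 100)
-- ===== Notes on version B (the rewrite author's own statement) =====
-- stated objective: alternative
-- what changed: Instead of testing each keyword for substring containment ('kw in text') in an if/elif ladder, B makes one left-to-right scan over the positions of the education text, checks which degree keywords start at each position (str.startswith(kw, i)) and accumulates a running maximum score plus a field-bonus flag, finishing with min(best+bonus, 100).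
import Mathlib
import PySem

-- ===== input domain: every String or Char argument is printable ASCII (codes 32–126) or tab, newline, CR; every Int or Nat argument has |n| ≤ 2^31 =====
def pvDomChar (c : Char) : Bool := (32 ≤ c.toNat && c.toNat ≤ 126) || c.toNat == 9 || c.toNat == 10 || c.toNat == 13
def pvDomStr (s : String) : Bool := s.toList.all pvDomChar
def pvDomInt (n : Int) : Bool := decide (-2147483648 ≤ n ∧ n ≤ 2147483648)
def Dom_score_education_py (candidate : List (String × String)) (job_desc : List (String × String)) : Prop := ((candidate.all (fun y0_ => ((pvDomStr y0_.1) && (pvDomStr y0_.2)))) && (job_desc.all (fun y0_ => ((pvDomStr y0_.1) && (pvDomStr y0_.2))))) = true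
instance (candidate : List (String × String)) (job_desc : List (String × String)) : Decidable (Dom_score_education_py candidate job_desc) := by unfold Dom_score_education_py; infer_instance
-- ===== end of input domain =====

-- B replaces A's per-keyword substring tests with a single left-to-right scan over text positions accumulating a running max score and bonus flag (alternative algorithm; same cost).


-- ===== PORT A =====
def score_education_py (candidate : List (String × String)) (job_desc : List (String × String)) : Int :=
  let score : Int := 50
  match (PySem.Dict.mk candidate).get? "education" with
  | none => score
  | some v =>
    let edu_text := PySem.Str.lower v
    let score :=
      if PySem.Str.isIn "phd" edu_text || PySem.Str.isIn "doctorate" edu_text then (100 : Int)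
      else if PySem.Str.isIn "master" edu_text || PySem.Str.isIn "msc" edu_text || PySem.Str.isIn "mba" edu_text then 85
      else if PySem.Str.isIn "bachelor" edu_text || PySem.Str.isIn "bsc" edu_text || PySem.Str.isIn "ba" edu_text then 70
      else score
    let relevant_fields := ["computer science", "software", "engineering", "data science", "mathematics"]
    if relevant_fields.any (fun field => PySem.Str.isIn field edu_text) then
      min (score + 15) 100
    else score

-- ===== PORT B =====
-- Source B's KW_SCORES dict, in its iteration order
def pvKwScores : List (List Char × Int) :=
  [("phd".toList, 100), ("doctorate".toList, 100),
   ("master".toList, 85), ("msc".toList, 85), ("mba".toList, 85),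
   ("bachelor".toList, 70), ("bsc".toList, 70), ("ba".toList, 70)]

def pvFieldsC : List (List Char) :=
  ["computer science".toList, "software".toList, "engineering".toList,
   "data science".toList, "mathematics".toList]

-- text.startswith(kw, i) with 0 ≤ i ≤ len(text) is exactly: kw is a prefix of (text dropped at i)
def score_education_py_alt (candidate : List (String × String)) (job_desc : List (String × String)) : Int :=
  match (PySem.Dict.mk candidate).get? "education" with
  | none => 50
  | some v =>
    let text := (PySem.Str.lower v).toList
    let st :=
      (List.range text.length).foldl (fun (st : Int × Int) i =>
        let best := pvKwScores.foldl
          (fun b p => if p.1.isPrefixOf (text.drop i) && b < p.2 then p.2 else b) st.1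
        let bonus :=
          if st.2 == 0 && pvFieldsC.any (fun f => f.isPrefixOf (text.drop i)) then (15 : Int)
          else st.2
        (best, bonus)) (50, 0)
    min (st.1 + st.2) 100

-- ===== PRECONDITION & SPEC =====
def Spec_score_education_py (candidate : List (String × String)) (job_desc : List (String × String)) (out : Int) : Prop := out = score_education_py_alt candidate job_desc
instance (candidate : List (String × String)) (job_desc : List (String × String)) (out : Int) : Decidable (Spec_score_education_py candidate job_desc out) := by unfold Spec_score_education_py; infer_instance

-- ===== CLAIM =====
def Claim_equal_score_education_py : Prop := ∀ (candidate : List (String × String)) (job_desc : List (String × String)), Dom_score_education_py candidate job_desc → Spec_score_education_py candidate job_desc (score_education_py candidate job_desc)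

-- ===== LEMMAS AND PROOFS =====

-- the degree ladder as a function of the three tier-match booleans
def pvLad (b100 b85 b70 : Bool) : Int :=
  if b100 then 100 else if b85 then 85 else if b70 then 70 else 50

-- per-position tier-match booleans
def pvP1 (t : List Char) (i : Nat) : Bool :=
  "phd".toList.isPrefixOf (t.drop i) || "doctorate".toList.isPrefixOf (t.drop i)
def pvP2 (t : List Char) (i : Nat) : Bool :=
  "master".toList.isPrefixOf (t.drop i) || "msc".toList.isPrefixOf (t.drop i)
    || "mba".toList.isPrefixOf (t.drop i)
def pvP3 (t : List Char) (i : Nat) : Bool :=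
  "bachelor".toList.isPrefixOf (t.drop i) || "bsc".toList.isPrefixOf (t.drop i)
    || "ba".toList.isPrefixOf (t.drop i)

lemma pv_ladmax (a1 a2 a3 c1 c2 c3 : Bool) :
    max (pvLad a1 a2 a3) (pvLad c1 c2 c3) = pvLad (a1 || c1) (a2 || c2) (a3 || c3) := by
  cases a1 <;> cases a2 <;> cases a3 <;> cases c1 <;> cases c2 <;> cases c3 <;> decide

-- one fold step in max form
lemma pv_step_eq (c : Bool) (b s : Int) :
    (if (c && decide (b < s)) = true then s else b) = if c = true then max b s else b := by
  cases c <;> simp <;> omega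

-- the inner keyword fold, over abstract match booleans
set_option maxHeartbeats 2000000 in
lemma pv_inner_gen (c1 c2 c3 c4 c5 c6 c7 c8 : Bool) (b : Int) (hb : 50 ≤ b) :
    ([(c1, 100), (c2, 100), (c3, 85), (c4, 85), (c5, 85),
      (c6, 70), (c7, 70), (c8, 70)] : List (Bool × Int)).foldl
        (fun b p => if p.1 && b < p.2 then p.2 else b) b
      = max b (pvLad (c1 || c2) (c3 || c4 || c5) (c6 || c7 || c8)) := by
  simp only [List.foldl, pv_step_eq, pvLad]
  cases c1 <;> cases c2 <;> cases c3 <;> cases c4 <;> cases c5 <;> cases c6 <;> cases c7 <;>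
    cases c8 <;> simp <;> omega

-- the inner keyword fold at a fixed position is a max with the row score
lemma pv_inner (t : List Char) (i : Nat) (b : Int) (hb : 50 ≤ b) :
    pvKwScores.foldl (fun b p => if p.1.isPrefixOf (t.drop i) && b < p.2 then p.2 else b) b
      = max b (pvLad (pvP1 t i) (pvP2 t i) (pvP3 t i)) := by
  exact pv_inner_gen ("phd".toList.isPrefixOf (t.drop i))
    ("doctorate".toList.isPrefixOf (t.drop i)) ("master".toList.isPrefixOf (t.drop i))
    ("msc".toList.isPrefixOf (t.drop i)) ("mba".toList.isPrefixOf (t.drop i))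
    ("bachelor".toList.isPrefixOf (t.drop i)) ("bsc".toList.isPrefixOf (t.drop i))
    ("ba".toList.isPrefixOf (t.drop i)) b hb

-- the outer fold of the best component
lemma pv_best (t : List Char) (l : List Nat) (b : Int) (hb : 50 ≤ b) :
    l.foldl (fun b i =>
        pvKwScores.foldl (fun b p => if p.1.isPrefixOf (t.drop i) && b < p.2 then p.2 else b) b) b
      = max b (pvLad (l.any (pvP1 t)) (l.any (pvP2 t)) (l.any (pvP3 t))) := by
  induction l generalizing b with
  | nil => simp [pvLad]; omega
  | cons i l ih =>
    simp only [List.foldl_cons, List.any_cons]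
    rw [pv_inner t i b hb, ih _ (le_trans hb (le_max_left _ _)), max_assoc, pv_ladmax]

-- the bonus component: stays 15 once set
lemma pv_bonus15 (t : List Char) (l : List Nat) :
    l.foldl (fun c i =>
        if c == 0 && pvFieldsC.any (fun f => f.isPrefixOf (t.drop i)) then (15 : Int) else c) 15
      = 15 := by
  induction l with
  | nil => rfl
  | cons i l ih =>
    simp only [List.foldl_cons]
    rw [if_neg (by simp)]
    exact ih

lemma pv_bonus0 (t : List Char) (l : List Nat) :
    l.foldl (fun c i =>
        if c == 0 && pvFieldsC.any (fun f => f.isPrefixOf (t.drop i)) then (15 : Int) else c) 0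
      = if l.any (fun i => pvFieldsC.any (fun f => f.isPrefixOf (t.drop i))) then 15 else 0 := by
  induction l with
  | nil => rfl
  | cons i l ih =>
    simp only [List.foldl_cons, List.any_cons]
    by_cases h : pvFieldsC.any (fun f => f.isPrefixOf (t.drop i)) = true
    · rw [if_pos (by simp [h]), pv_bonus15, if_pos (by simp [h])]
    · simp only [Bool.not_eq_true] at h
      rw [if_neg (by simp [h]), ih]
      simp [h]

-- the pair fold splits into its two independent component folds
lemma pv_split (t : List Char) (l : List Nat) (a b : Int) :
    l.foldl (fun (st : Int × Int) i =>
        let best := pvKwScores.foldl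
          (fun b p => if p.1.isPrefixOf (t.drop i) && b < p.2 then p.2 else b) st.1
        let bonus :=
          if st.2 == 0 && pvFieldsC.any (fun f => f.isPrefixOf (t.drop i)) then (15 : Int)
          else st.2
        (best, bonus)) (a, b)
      = (l.foldl (fun b i =>
            pvKwScores.foldl (fun b p => if p.1.isPrefixOf (t.drop i) && b < p.2 then p.2 else b) b) a,
         l.foldl (fun c i =>
            if c == 0 && pvFieldsC.any (fun f => f.isPrefixOf (t.drop i)) then (15 : Int) else c) b) := by
  induction l generalizing a b with
  | nil => rfl
  | cons i l ih => simpa using ih _ _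

-- a nonempty keyword occurs as a substring iff it starts at some scanned position
lemma pv_any_isIn (kw t : List Char) (hk : kw ≠ []) :
    (List.range t.length).any (fun i => kw.isPrefixOf (t.drop i)) = PySem.Chars.isIn kw t := by
  have h := PySem.Chars.exists_prefix_drop_iff_isIn (sub := kw) (s := t)
  rw [Bool.eq_iff_iff]
  simp only [List.any_eq_true, List.mem_range, List.isPrefixOf_iff_prefix]
  constructor
  · rintro ⟨i, _, hp⟩; exact h.mp ⟨i, hp⟩
  · intro hin
    obtain ⟨j, hj⟩ := h.mpr hin
    rcases Nat.lt_or_ge j t.length with hl | hl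
    · exact ⟨j, hl, hj⟩
    · rw [List.drop_eq_nil_of_le hl] at hj
      exact absurd (List.prefix_nil.mp hj) hk

-- any-over-or distributes
lemma pv_any_or {α : Type} (l : List α) (p q : α → Bool) :
    l.any (fun x => p x || q x) = (l.any p || l.any q) := by
  induction l with
  | nil => rfl
  | cons x l ih =>
    simp only [List.any_cons, ih]
    cases p x <;> cases q x <;> simp

-- the three tier conditions over the scan equal the per-keyword substring tests
lemma pv_t1 (t : List Char) :
    (List.range t.length).any (pvP1 t)
      = (PySem.Chars.isIn "phd".toList t || PySem.Chars.isIn "doctorate".toList t) := by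
  have h : pvP1 t = fun i =>
      ("phd".toList.isPrefixOf (t.drop i) || "doctorate".toList.isPrefixOf (t.drop i)) := rfl
  rw [h, pv_any_or, pv_any_isIn "phd".toList t (by decide),
    pv_any_isIn "doctorate".toList t (by decide)]

lemma pv_t2 (t : List Char) :
    (List.range t.length).any (pvP2 t)
      = (PySem.Chars.isIn "master".toList t || PySem.Chars.isIn "msc".toList t
          || PySem.Chars.isIn "mba".toList t) := by
  have h : pvP2 t = fun i =>
      (("master".toList.isPrefixOf (t.drop i) || "msc".toList.isPrefixOf (t.drop i))
        || "mba".toList.isPrefixOf (t.drop i)) := rfl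
  rw [h, pv_any_or, pv_any_or, pv_any_isIn "master".toList t (by decide),
    pv_any_isIn "msc".toList t (by decide), pv_any_isIn "mba".toList t (by decide)]

lemma pv_t3 (t : List Char) :
    (List.range t.length).any (pvP3 t)
      = (PySem.Chars.isIn "bachelor".toList t || PySem.Chars.isIn "bsc".toList t
          || PySem.Chars.isIn "ba".toList t) := by
  have h : pvP3 t = fun i =>
      (("bachelor".toList.isPrefixOf (t.drop i) || "bsc".toList.isPrefixOf (t.drop i))
        || "ba".toList.isPrefixOf (t.drop i)) := rfl
  rw [h, pv_any_or, pv_any_or, pv_any_isIn "bachelor".toList t (by decide),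
    pv_any_isIn "bsc".toList t (by decide), pv_any_isIn "ba".toList t (by decide)]

-- the bonus condition over the scan equals the per-field substring tests
lemma pv_bonus_any (t : List Char) :
    (List.range t.length).any (fun i => pvFieldsC.any (fun f => f.isPrefixOf (t.drop i)))
      = pvFieldsC.any (fun f => PySem.Chars.isIn f t) := by
  simp only [pvFieldsC, List.any_cons, List.any_nil, Bool.or_false]
  rw [pv_any_or, pv_any_or, pv_any_or, pv_any_or]
  rw [pv_any_isIn _ t (by decide), pv_any_isIn _ t (by decide), pv_any_isIn _ t (by decide),
      pv_any_isIn _ t (by decide), pv_any_isIn _ t (by decide)]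

-- ===== VERDICT =====
set_option maxHeartbeats 2000000 in
theorem score_education_py_spec : Claim_equal_score_education_py := by
  intro candidate job_desc _
  unfold Spec_score_education_py score_education_py score_education_py_alt
  cases (PySem.Dict.mk candidate).get? "education" with
  | none => rfl
  | some v =>
    simp only []
    rw [pv_split, pv_best _ _ _ (by norm_num), pv_bonus0, pv_bonus_any, pv_t1, pv_t2, pv_t3]
    simp only [PySem.Str.isIn_eq, pvFieldsC, List.any_cons, List.any_nil, Bool.or_false]
    rcases Bool.dichotomy (PySem.Chars.isIn "phd".toList (PySem.Str.lower v).toList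
        || PySem.Chars.isIn "doctorate".toList (PySem.Str.lower v).toList) with h1 | h1 <;>
      rcases Bool.dichotomy (PySem.Chars.isIn "master".toList (PySem.Str.lower v).toList
        || PySem.Chars.isIn "msc".toList (PySem.Str.lower v).toList
        || PySem.Chars.isIn "mba".toList (PySem.Str.lower v).toList) with h2 | h2 <;>
      rcases Bool.dichotomy (PySem.Chars.isIn "bachelor".toList (PySem.Str.lower v).toList
        || PySem.Chars.isIn "bsc".toList (PySem.Str.lower v).toList
        || PySem.Chars.isIn "ba".toList (PySem.Str.lower v).toList) with h3 | h3 <;>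
      rcases Bool.dichotomy (PySem.Chars.isIn "computer science".toList (PySem.Str.lower v).toList
        || (PySem.Chars.isIn "software".toList (PySem.Str.lower v).toList
        || (PySem.Chars.isIn "engineering".toList (PySem.Str.lower v).toList
        || (PySem.Chars.isIn "data science".toList (PySem.Str.lower v).toList
        || PySem.Chars.isIn "mathematics".toList (PySem.Str.lower v).toList)))) with h4 | h4 <;>
      simp only [h1, h2, h3, h4, pvLad, if_true, if_false, Bool.false_eq_true] <;> norm_num
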